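-- pv_equiv track=rewrite | github.com/vihaankava/nonprofit | backend_python/services/chat_service.py | _extract_material_content
-- ===== SOURCE A (Python) =====
-- from typing import Dict, Any, Optional, List
--
-- def _extract_material_content(content: str, material_type: str) -> Optional[str]:
--     """Extract specific material content from AI response."""
--     # This is a simplified extraction - in a real implementation,
--     # you'd use more sophisticated parsing
--     lines = content.split('\n')
--     material_lines = []
--     in_material = False
--
--     for line in lines:
--         if material_type.lower() in line.lower() or in_material:
--             in_material = True
--             material_lines.append(line)
--             # Stop at next section or end
--             if line.strip() == "" and len(material_lines) > 3:
--                 break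
--
--     return '\n'.join(material_lines) if material_lines else None
-- ===== SOURCE B (Python) =====
-- from typing import Optional
--
-- def _extract_material_content(content: str, material_type: str) -> Optional[str]:
--     """Extract specific material content: locate the first matching line, then collect."""
--     lines = content.split('\n')
--     needle = material_type.lower()
--     start = None
--     for i, line in enumerate(lines):
--         if needle in line.lower():
--             start = i
--             break
--     if start is None:
--         return None
--     material_lines = []
--     for line in lines[start:]:
--         material_lines.append(line)
--         if line.strip() == "" and len(material_lines) > 3:
--             break
--     return '\n'.join(material_lines)
-- ===== Notes on version B (the rewrite author's own statement) =====
-- stated objective: simpler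
-- what changed: Replaces A's single pass with a latching in_material flag (re-testing the match condition on every line) by a two-phase decomposition: find the index of the first line containing material_type case-insensitively, then collect lines from there until the blank-line stop condition.
import Mathlib
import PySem

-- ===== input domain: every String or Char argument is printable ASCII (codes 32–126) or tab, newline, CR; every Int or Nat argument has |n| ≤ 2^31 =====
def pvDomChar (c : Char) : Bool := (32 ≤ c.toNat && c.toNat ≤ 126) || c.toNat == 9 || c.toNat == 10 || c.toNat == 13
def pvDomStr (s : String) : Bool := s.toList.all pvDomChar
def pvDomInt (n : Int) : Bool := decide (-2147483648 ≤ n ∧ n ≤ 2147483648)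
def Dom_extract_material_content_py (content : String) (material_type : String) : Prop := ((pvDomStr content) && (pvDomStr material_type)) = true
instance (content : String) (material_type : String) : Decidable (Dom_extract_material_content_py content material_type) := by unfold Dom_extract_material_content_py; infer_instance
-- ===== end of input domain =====

-- B replaces A's latching in_material flag by a two-phase decomposition (find the first
-- matching line's index, then collect from there); objective: simpler, same cost.

-- ===== PORT A =====
-- A's single loop: state = (material_lines, in_material); branches in source order.
def pvLoopA (needle : String) : List String → List String → Bool → List String
  | [], acc, _ => acc
  | l :: rest, acc, inm =>
    if PySem.Str.isIn needle (PySem.Str.lower l) || inm then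
      let acc' := acc ++ [l]
      if PySem.Str.strip l == "" && decide (acc'.length > 3) then acc'
      else pvLoopA needle rest acc' true
    else pvLoopA needle rest acc inm

def extract_material_content_py (content : String) (material_type : String) : Option String :=
  let lines := (PySem.Str.split? content "\n").getD []
  let material_lines := pvLoopA (PySem.Str.lower material_type) lines [] false
  if material_lines.isEmpty then none else some (PySem.Str.join "\n" material_lines)

-- ===== PORT B =====
-- B phase 1: index of the first line whose lowercase contains the needle (enumerate + break).
def pvFindStart (needle : String) : List String → Option Nat
  | [] => none
  | l :: rest =>
    if PySem.Str.isIn needle (PySem.Str.lower l) then some 0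
    else (pvFindStart needle rest).map (· + 1)

-- B phase 2: collect lines until a blank line once more than 3 are collected.
def pvCollectB : List String → List String → List String
  | [], acc => acc
  | l :: rest, acc =>
    let acc' := acc ++ [l]
    if PySem.Str.strip l == "" && decide (acc'.length > 3) then acc'
    else pvCollectB rest acc'

def extract_material_content_py_alt (content : String) (material_type : String) : Option String :=
  let lines := (PySem.Str.split? content "\n").getD []
  match pvFindStart (PySem.Str.lower material_type) lines with
  | none => none
  -- lines[start:] with 0 ≤ start ≤ len lines is exactly List.drop start
  | some i => some (PySem.Str.join "\n" (pvCollectB (lines.drop i) []))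

-- ===== PRECONDITION & SPEC =====
def Spec_extract_material_content_py (content : String) (material_type : String) (out : Option String) : Prop := out = extract_material_content_py_alt content material_type
instance (content : String) (material_type : String) (out : Option String) : Decidable (Spec_extract_material_content_py content material_type out) := by unfold Spec_extract_material_content_py; infer_instance

-- ===== CLAIM (what is proved, stated in full; the proofs are below) =====
def Claim_equal_extract_material_content_py : Prop := ∀ (content : String) (material_type : String), Dom_extract_material_content_py content material_type → Spec_extract_material_content_py content material_type (extract_material_content_py content material_type)

-- ===== LEMMAS AND PROOFS =====

-- once in_material is latched, A's loop is exactly B's collect loop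
theorem pvLoopA_true (needle : String) : ∀ (xs acc : List String),
    pvLoopA needle xs acc true = pvCollectB xs acc := by
  intro xs
  induction xs with
  | nil => intro acc; rfl
  | cons l rest ih =>
    intro acc
    simp only [pvLoopA, pvCollectB, Bool.or_true, if_true]
    split
    · rfl
    · exact ih _

theorem pvCollectB_ne_nil : ∀ (xs acc : List String),
    pvCollectB xs acc = [] → acc = [] := by
  intro xs
  induction xs with
  | nil => intro acc h; simpa [pvCollectB] using h
  | cons l rest ih =>
    intro acc h
    simp only [pvCollectB] at h
    split at h
    · simp at h
    · have := ih _ h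
      simp at this

theorem pvMain (needle : String) : ∀ (lines : List String),
    (if (pvLoopA needle lines [] false).isEmpty then none
     else some (PySem.Str.join "\n" (pvLoopA needle lines [] false))) =
    (match pvFindStart needle lines with
     | none => none
     | some i => some (PySem.Str.join "\n" (pvCollectB (lines.drop i) []))) := by
  intro lines
  induction lines with
  | nil => rfl
  | cons l rest ih =>
    by_cases h : PySem.Str.isIn needle (PySem.Str.lower l) = true
    · -- match on the first line: A's loop becomes the collect loop at index 0
      have hA : pvLoopA needle (l :: rest) [] false = pvCollectB (l :: rest) [] := by
        simp only [pvLoopA, pvCollectB, h, Bool.true_or, if_true, List.nil_append]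
        split
        · rfl
        · exact pvLoopA_true needle rest [l]
      have hne : pvCollectB (l :: rest) [] ≠ [] := by
        intro hnil
        simp only [pvCollectB, List.nil_append] at hnil
        split at hnil
        · exact List.cons_ne_nil _ _ hnil
        · exact List.cons_ne_nil _ _ (pvCollectB_ne_nil _ _ hnil)
      rw [hA]
      simp only [pvFindStart, h, if_true, List.drop_zero, List.isEmpty_iff, hne,
        if_false]
    · -- no match: A skips the line; B increments the index, drop commutes
      have hA : pvLoopA needle (l :: rest) [] false = pvLoopA needle rest [] false := by
        simp only [pvLoopA, Bool.or_false]
        rw [if_neg h]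
      rw [hA, ih]
      simp only [pvFindStart]
      rw [if_neg h]
      cases hf : pvFindStart needle rest with
      | none => simp
      | some i => simp [List.drop_succ_cons]

-- ===== VERDICT (by name: the statement is the Claim_ definition above) =====
theorem extract_material_content_py_spec : Claim_equal_extract_material_content_py := by
  intro content material_type _
  unfold Spec_extract_material_content_py extract_material_content_py extract_material_content_py_alt
  exact pvMain _ _
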